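-- pv_equiv track=rewrite | github.com/AlexAsadullin/algo_lab_n2 | map.py | query_map
-- ===== SOURCE A (Python) =====
-- def query_map(x, y, x_sorted, y_sorted, map_grid):
--     left, right = 0, len(x_sorted) - 1
--     x_idx = -1
--     while left <= right:
--         mid = (left + right) // 2
--         if x_sorted[mid] <= x:
--             x_idx = mid
--             left = mid + 1
--         else:
--             right = mid - 1
--
--     left, right = 0, len(y_sorted) - 1
--     y_idx = -1
--     while left <= right:
--         mid = (left + right) // 2
--         if y_sorted[mid] <= y:
--             y_idx = mid
--             left = mid + 1
--         else:
--             right = mid - 1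
--
--     if x_idx >= 0 and y_idx >= 0 and x_idx < len(x_sorted) - 1 and y_idx < len(y_sorted) - 1:
--         return map_grid.get((x_idx, y_idx), 0)
--     else:
--         return 0
-- ===== SOURCE B (Python) =====
-- def query_map(x, y, x_sorted, y_sorted, map_grid):
--     # Recursive interval search returning None when no element <= v exists,
--     # instead of A's two mutable-state while loops with a -1 sentinel.
--     def locate(a, v, lo, hi):
--         if lo > hi:
--             return None
--         m = (lo + hi) // 2
--         if a[m] <= v:
--             r = locate(a, v, m + 1, hi)
--             return m if r is None else r
--         return locate(a, v, lo, m - 1)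
--
--     xi = locate(x_sorted, x, 0, len(x_sorted) - 1)
--     yi = locate(y_sorted, y, 0, len(y_sorted) - 1)
--     if xi is None or yi is None:
--         return 0
--     if xi >= len(x_sorted) - 1 or yi >= len(y_sorted) - 1:
--         return 0
--     return map_grid.get((xi, yi), 0)
-- ===== Notes on version B (the rewrite author's own statement) =====
-- stated objective: alternative
-- what changed: A's two while-loops with mutable left/right and a -1 sentinel accumulator are replaced by one recursive interval search that returns None when no element fits (the answer bubbles up from the right sub-interval), with an inverted early-return guard and a direct dict lookup at the end.
import Mathlib
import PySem

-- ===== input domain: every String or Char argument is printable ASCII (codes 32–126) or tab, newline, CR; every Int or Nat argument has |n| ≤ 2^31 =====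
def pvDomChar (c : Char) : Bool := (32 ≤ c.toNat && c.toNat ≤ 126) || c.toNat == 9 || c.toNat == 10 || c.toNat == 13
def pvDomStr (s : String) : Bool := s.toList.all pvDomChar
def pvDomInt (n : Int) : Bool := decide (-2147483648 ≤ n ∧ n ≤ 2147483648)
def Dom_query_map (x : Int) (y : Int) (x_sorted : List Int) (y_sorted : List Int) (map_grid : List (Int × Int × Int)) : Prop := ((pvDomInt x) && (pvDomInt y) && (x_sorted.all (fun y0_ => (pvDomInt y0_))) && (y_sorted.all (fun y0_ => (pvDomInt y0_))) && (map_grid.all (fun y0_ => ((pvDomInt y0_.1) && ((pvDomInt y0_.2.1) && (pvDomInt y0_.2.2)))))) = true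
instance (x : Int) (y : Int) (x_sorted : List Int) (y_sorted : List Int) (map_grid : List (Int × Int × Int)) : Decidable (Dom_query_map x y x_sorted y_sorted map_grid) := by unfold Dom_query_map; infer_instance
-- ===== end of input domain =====

-- B replaces A's two mutable while loops (left/right/idx state, -1 sentinel) by one
-- recursive Option-returning interval search; equivalence is proved on all inputs.

-- ===== PORT A =====
-- A's while loop: left/right/x_idx state. The Nat fuel only makes the recursion
-- structural; fuel = list length ≥ interval width at the top call, so it never runs out.
-- a[mid] is always in range on every probe reached from the initial call, so .getD 0 is exact.
def queryLoopA (a : List Int) (v : Int) : Nat → Int → Int → Int → Int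
  | 0, _, _, idx => idx
  | Nat.succ f, l, r, idx =>
    if l ≤ r then
      let m := PySem.Int.floordiv (l + r) 2
      if (PySem.List.pyGet? a m).getD 0 ≤ v then
        queryLoopA a v f (m + 1) r m
      else
        queryLoopA a v f l (m - 1) idx
    else idx

-- dict.get((x_idx, y_idx), 0): first matching key, else 0
def gridGetA (mg : List (Int × Int × Int)) (kx ky : Int) : Int :=
  match mg with
  | [] => 0
  | (a, b, v) :: t => if a = kx ∧ b = ky then v else gridGetA t kx ky

def query_map (x : Int) (y : Int) (x_sorted : List Int) (y_sorted : List Int) (map_grid : List (Int × Int × Int)) : Int :=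
  let x_idx := queryLoopA x_sorted x x_sorted.length 0 ((x_sorted.length : Int) - 1) (-1)
  let y_idx := queryLoopA y_sorted y y_sorted.length 0 ((y_sorted.length : Int) - 1) (-1)
  if x_idx ≥ 0 ∧ y_idx ≥ 0 ∧ x_idx < (x_sorted.length : Int) - 1 ∧ y_idx < (y_sorted.length : Int) - 1 then
    gridGetA map_grid x_idx y_idx
  else 0

-- ===== PORT B =====
-- B's recursive helper: none when no probed element is ≤ v, otherwise the best
-- index bubbling up from the right sub-interval; well-founded on the interval width.
-- a[m] is in range on every probe reached from the initial call, so .getD 0 is exact.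
def locate (a : List Int) (v : Int) (lo hi : Int) : Option Int :=
  if h : lo ≤ hi then
    if (PySem.List.pyGet? a (PySem.Int.floordiv (lo + hi) 2)).getD 0 ≤ v then
      (locate a v (PySem.Int.floordiv (lo + hi) 2 + 1) hi).orElse
        (fun _ => some (PySem.Int.floordiv (lo + hi) 2))
    else
      locate a v lo (PySem.Int.floordiv (lo + hi) 2 - 1)
  else none
termination_by (hi + 1 - lo).toNat
decreasing_by
  all_goals
    obtain ⟨h1, h2⟩ := PySem.Int.floordiv_two_mid_bounds h
    omega

def query_map_alt (x : Int) (y : Int) (x_sorted : List Int) (y_sorted : List Int) (map_grid : List (Int × Int × Int)) : Int :=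
  match locate x_sorted x 0 ((x_sorted.length : Int) - 1),
        locate y_sorted y 0 ((y_sorted.length : Int) - 1) with
  | some xi, some yi =>
      if xi ≥ (x_sorted.length : Int) - 1 ∨ yi ≥ (y_sorted.length : Int) - 1 then 0
      else (map_grid.findSome? (fun p =>
              if p.1 = xi ∧ p.2.1 = yi then some p.2.2 else none)).getD 0
  | _, _ => 0

-- ===== PRECONDITION & SPEC =====
def Spec_query_map (x : Int) (y : Int) (x_sorted : List Int) (y_sorted : List Int) (map_grid : List (Int × Int × Int)) (out : Int) : Prop := out = query_map_alt x y x_sorted y_sorted map_grid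
instance (x : Int) (y : Int) (x_sorted : List Int) (y_sorted : List Int) (map_grid : List (Int × Int × Int)) (out : Int) : Decidable (Spec_query_map x y x_sorted y_sorted map_grid out) := by unfold Spec_query_map; infer_instance

-- ===== CLAIM =====
def Claim_equal_query_map : Prop := ∀ (x : Int) (y : Int) (x_sorted : List Int) (y_sorted : List Int) (map_grid : List (Int × Int × Int)), Dom_query_map x y x_sorted y_sorted map_grid → Spec_query_map x y x_sorted y_sorted map_grid (query_map x y x_sorted y_sorted map_grid)

-- ===== LEMMAS AND PROOFS =====

-- A's accumulator loop computes exactly B's recursive search with idx as the default,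
-- whenever the fuel covers the interval width.
theorem loopA_eq_locate (a : List Int) (v : Int) :
    ∀ (f : Nat) (l r idx : Int), (r + 1 - l).toNat ≤ f →
      queryLoopA a v f l r idx = (locate a v l r).getD idx := by
  intro f
  induction f with
  | zero =>
    intro l r idx hf
    have hlr : ¬ l ≤ r := by omega
    rw [locate]
    simp [queryLoopA, hlr]
  | succ f ih =>
    intro l r idx hf
    rw [locate, queryLoopA]
    by_cases h : l ≤ r
    · obtain ⟨h1, h2⟩ := PySem.Int.floordiv_two_mid_bounds h
      simp only [h, dif_pos, if_pos]
      by_cases hc : (PySem.List.pyGet? a (PySem.Int.floordiv (l + r) 2)).getD 0 ≤ v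
      · simp only [hc, if_pos]
        rw [ih (PySem.Int.floordiv (l + r) 2 + 1) r _ (by omega)]
        cases locate a v (PySem.Int.floordiv (l + r) 2 + 1) r with
        | none => simp [Option.orElse]
        | some i => simp [Option.orElse]
      · simp only [hc, if_neg, not_false_iff]
        exact ih l (PySem.Int.floordiv (l + r) 2 - 1) idx (by omega)
    · simp [h]

-- Every index B's search returns lies in the interval, in particular ≥ lo.
theorem locate_ge (a : List Int) (v : Int) :
    ∀ (lo hi i : Int), locate a v lo hi = some i → lo ≤ i := by
  intro lo hi
  induction lo, hi using locate.induct a v with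
  | case1 lo hi h hc ih =>
    intro i he
    obtain ⟨h1, h2⟩ := PySem.Int.floordiv_two_mid_bounds h
    rw [locate] at he
    simp only [h, dif_pos, hc, if_pos] at he
    cases hr : locate a v (PySem.Int.floordiv (lo + hi) 2 + 1) hi with
    | none => rw [hr] at he; simp [Option.orElse] at he; omega
    | some j =>
      rw [hr] at he; simp [Option.orElse] at he
      have := ih j hr
      omega
  | case2 lo hi h hc ih =>
    intro i he
    obtain ⟨h1, h2⟩ := PySem.Int.floordiv_two_mid_bounds h
    rw [locate] at he
    simp only [h, dif_pos, hc, if_neg, not_false_iff] at he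
    have := ih i he
    omega
  | case3 lo hi h =>
    intro i he
    rw [locate] at he
    simp [h] at he

-- A's manual first-match recursion equals B's findSome? lookup.
theorem gridGet_eq (mg : List (Int × Int × Int)) (kx ky : Int) :
    gridGetA mg kx ky
      = (mg.findSome? (fun p => if p.1 = kx ∧ p.2.1 = ky then some p.2.2 else none)).getD 0 := by
  induction mg with
  | nil => simp [gridGetA]
  | cons p t ihp =>
    obtain ⟨a, b, v⟩ := p
    by_cases hk : a = kx ∧ b = ky
    · simp [gridGetA, List.findSome?, hk]
    · simp only [gridGetA, List.findSome?, if_neg hk]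
      exact ihp

-- ===== VERDICT =====
theorem query_map_spec : Claim_equal_query_map := by
  intro x y xs ys mg _
  unfold Spec_query_map query_map query_map_alt
  rw [loopA_eq_locate xs x xs.length 0 ((xs.length : Int) - 1) (-1) (by omega),
      loopA_eq_locate ys y ys.length 0 ((ys.length : Int) - 1) (-1) (by omega)]
  cases hx : locate xs x 0 ((xs.length : Int) - 1) with
  | none =>
    cases hy : locate ys y 0 ((ys.length : Int) - 1) with
    | none => simp
    | some j => simp
  | some i =>
    have hi := locate_ge xs x 0 ((xs.length : Int) - 1) i hx
    cases hy : locate ys y 0 ((ys.length : Int) - 1) with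
    | none => simp
    | some j =>
      have hj := locate_ge ys y 0 ((ys.length : Int) - 1) j hy
      simp only [Option.getD_some]
      by_cases hg : i ≥ (xs.length : Int) - 1 ∨ j ≥ (ys.length : Int) - 1
      · rw [if_neg (by omega), if_pos hg]
      · rw [if_pos (by omega), if_neg hg, gridGet_eq]
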